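-- pv_equiv track=rewrite | github.com/chenc17/sudoku | python/sudokuIO.py | sudokuRowToLine
-- ===== SOURCE A (Python) =====
-- def sudokuRowToLine(row):
--     result = ""
--     for i in range(len(row)):
--         if( i % 3 == 0):
--             result += "| "
--         if(row[i] == 0):
--             result += "- "
--         else:
--             result += str(row[i]) + " "
--
--     result += "|\n"
--     return result
-- ===== SOURCE B (Python) =====
-- def sudokuRowToLine(row):
--     blocks = []
--     for i in range(0, len(row), 3):
--         cells = "".join("- " if v == 0 else str(v) + " " for v in row[i:i+3])
--         blocks.append("| " + cells)
--     return "".join(blocks) + "|\n"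
-- ===== Notes on version B (the rewrite author's own statement) =====
-- stated objective: alternative
-- what changed: Replaces the flat index loop with its i % 3 guard by an outer loop over blocks of three (range(0,len,3) with slices), building each block string separately and joining them.
import Mathlib
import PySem

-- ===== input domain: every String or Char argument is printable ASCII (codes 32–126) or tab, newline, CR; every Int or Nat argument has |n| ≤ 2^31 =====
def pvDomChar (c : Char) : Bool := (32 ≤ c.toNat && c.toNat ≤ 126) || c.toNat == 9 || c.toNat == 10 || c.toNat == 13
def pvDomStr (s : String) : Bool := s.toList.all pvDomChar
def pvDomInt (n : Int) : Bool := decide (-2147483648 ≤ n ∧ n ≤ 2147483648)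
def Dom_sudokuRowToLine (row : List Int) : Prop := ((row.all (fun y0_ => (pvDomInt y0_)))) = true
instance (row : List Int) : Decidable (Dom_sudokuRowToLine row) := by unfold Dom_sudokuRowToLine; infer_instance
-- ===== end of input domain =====

-- B re-groups the row into blocks of three (outer loop over block starts, inner pass
-- over each block's cells) instead of A's flat index loop with an i % 3 guard; same cost.

-- ===== PORT A =====
def sudokuRowToLine (row : List Int) : String :=
  let result : String :=
    (PySem.List.pyRange 0 (row.length : Int) 1).foldl
      (fun result i =>
        let result := if PySem.Int.mod i 3 = 0 then result ++ "| " else result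
        if PySem.List.pyGetD row i 0 = 0 then result ++ "- "
        else result ++ PySem.Int.toStr (PySem.List.pyGetD row i 0) ++ " ") ""
  result ++ "|\n"

-- ===== PORT B =====
-- cell text for one value: '- ' for zero, str(v)+' ' otherwise
def altCell (v : Int) : String := if v = 0 then "- " else PySem.Int.toStr v ++ " "

-- one block string per slice row[i:i+3]; recursion mirrors the range(0,len,3) loop
def altBlocks : List Int → List String
  | [] => []
  | v :: vs => ("| " ++ String.join (((v :: vs).take 3).map altCell)) :: altBlocks ((v :: vs).drop 3)
termination_by l => l.length
decreasing_by simp [List.drop]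

def sudokuRowToLine_alt (row : List Int) : String :=
  String.join (altBlocks row) ++ "|\n"

-- ===== PRECONDITION & SPEC =====
def Spec_sudokuRowToLine (row : List Int) (out : String) : Prop := out = sudokuRowToLine_alt row
instance (row : List Int) (out : String) : Decidable (Spec_sudokuRowToLine row out) := by unfold Spec_sudokuRowToLine; infer_instance

-- ===== CLAIM (what is proved, stated in full; the proofs are below) =====
def Claim_equal_sudokuRowToLine : Prop := ∀ (row : List Int), Dom_sudokuRowToLine row → Spec_sudokuRowToLine row (sudokuRowToLine row)

-- ===== LEMMAS AND PROOFS =====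

-- A's loop, rephrased as a recursion carrying the running index
def aGo (s : Int) : List Int → String
  | [] => ""
  | v :: vs =>
      (if PySem.Int.mod s 3 = 0 then "| " else "") ++
      (if v = 0 then "- " else PySem.Int.toStr v ++ " ") ++ aGo (s + 1) vs

theorem aGo_fold (l : List Int) : ∀ (s : Int) (acc : String),
    (PySem.List.enumerate l s).foldl
      (fun acc p =>
        let acc := if PySem.Int.mod p.1 3 = 0 then acc ++ "| " else acc
        if p.2 = 0 then acc ++ "- " else acc ++ PySem.Int.toStr p.2 ++ " ") acc
    = acc ++ aGo s l := by
  induction l with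
  | nil => intro s acc; simp [PySem.List.enumerate_nil, aGo]
  | cons v vs ih =>
      intro s acc
      simp only [PySem.List.enumerate_cons, List.foldl_cons, ih, aGo]
      split_ifs <;> simp [String.append_assoc]

theorem aGo_shift (l : List Int) : ∀ (s t : Int),
    PySem.Int.mod s 3 = PySem.Int.mod t 3 → aGo s l = aGo t l := by
  induction l with
  | nil => intro s t _; rfl
  | cons v vs ih =>
      intro s t h
      have h3 : (0:Int) < 3 := by norm_num
      rw [PySem.Int.mod_eq_emod_of_pos h3, PySem.Int.mod_eq_emod_of_pos h3] at h
      simp only [aGo, PySem.Int.mod_eq_emod_of_pos h3, h]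
      rw [ih (s + 1) (t + 1)
        (by rw [PySem.Int.mod_eq_emod_of_pos h3, PySem.Int.mod_eq_emod_of_pos h3]; omega)]

theorem foldl_str_append (l : List String) : ∀ (a : String),
    l.foldl (· ++ ·) a = a ++ l.foldl (· ++ ·) "" := by
  induction l with
  | nil => intro a; simp
  | cons y ys ih =>
      intro a
      rw [List.foldl_cons, List.foldl_cons, ih (a ++ y), ih ("" ++ y)]
      simp [String.append_assoc]

theorem join_nil : String.join ([] : List String) = "" := rfl

theorem join_cons (x : String) (xs : List String) :
    String.join (x :: xs) = x ++ String.join xs := by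
  simp only [String.join, List.foldl_cons]
  rw [foldl_str_append xs ("" ++ x)]
  simp

theorem altBlocks_nil : altBlocks [] = [] := by rw [altBlocks]

theorem altBlocks_cons (v : Int) (vs : List Int) :
    altBlocks (v :: vs)
      = ("| " ++ String.join (((v :: vs).take 3).map altCell)) :: altBlocks ((v :: vs).drop 3) := by
  rw [altBlocks]

theorem aGo_join : ∀ (n : Nat) (l : List Int), l.length ≤ n →
    aGo 0 l = String.join (altBlocks l) := by
  intro n
  induction n with
  | zero =>
      intro l h
      match l with
      | [] => rw [altBlocks_nil, join_nil]; rfl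
      | _ :: _ => simp at h
  | succ n ih =>
      intro l h
      match l with
      | [] => rw [altBlocks_nil, join_nil]; rfl
      | [a] =>
          simp [aGo, altBlocks_cons, altBlocks_nil, join_cons, join_nil, altCell]
      | [a, b] =>
          simp [aGo, altBlocks_cons, altBlocks_nil, join_cons, join_nil, altCell,
                String.append_assoc]
      | a :: b :: c :: rest =>
          have hr : aGo 3 rest = String.join (altBlocks rest) := by
            rw [aGo_shift rest 3 0 (by decide)]
            exact ih rest (by simp at h ⊢; omega)
          simp [aGo, altBlocks_cons, join_cons, join_nil, altCell, hr,
                String.append_assoc]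

-- ===== VERDICT (by name: the statement is the Claim_ definition above) =====
theorem sudokuRowToLine_spec : Claim_equal_sudokuRowToLine := by
  intro row _
  show sudokuRowToLine row = sudokuRowToLine_alt row
  have h2 := aGo_fold row 0 ""
  rw [PySem.List.enumerate_eq_map_pyRange (d := 0), List.foldl_map] at h2
  have h3 : sudokuRowToLine row = "" ++ aGo 0 row ++ "|\n" := by
    show (PySem.List.pyRange 0 (row.length : Int) 1).foldl
      (fun result i =>
        let result := if PySem.Int.mod i 3 = 0 then result ++ "| " else result
        if PySem.List.pyGetD row i 0 = 0 then result ++ "- "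
        else result ++ PySem.Int.toStr (PySem.List.pyGetD row i 0) ++ " ") "" ++ "|\n"
      = "" ++ aGo 0 row ++ "|\n"
    exact congrArg (· ++ "|\n") h2
  rw [h3, aGo_join row.length row le_rfl]
  simp [sudokuRowToLine_alt]
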